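-- pv_equiv track=rewrite | github.com/sk408/trytry | src/analytics/stats_engine.py | _get_position_group
-- ===== SOURCE A (Python) =====
-- def _get_position_group(position: str) -> str:
--     """
--     Normalize positions into groups: Guard (G), Forward (F), Center (C).
--     Combo positions like G-F get grouped by primary position.
--     """
--     pos = position.upper().strip()
--     if not pos:
--         return "F"  # Default to forward if unknown
--
--     # Handle common position formats
--     if pos in ("PG", "SG", "G"):
--         return "G"
--     if pos in ("SF", "PF", "F"):
--         return "F"
--     if pos in ("C",):
--         return "C"
--
--     # Handle combo positions like "G-F", "F-C", "PG-SG"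
--     if "-" in pos:
--         parts = pos.split("-")
--         # Use first part as primary
--         return _get_position_group(parts[0])
--
--     # Handle formats like "Guard", "Forward", "Center"
--     if "GUARD" in pos:
--         return "G"
--     if "FORWARD" in pos:
--         return "F"
--     if "CENTER" in pos:
--         return "C"
--
--     return "F"  # Default
-- ===== SOURCE B (Python) =====
-- def _get_position_group(position: str) -> str:
--     """Non-recursive: extract the primary token up front, then one flat check chain."""
--     primary = position.upper().strip().split("-")[0].strip()
--     if not primary:
--         return "F"
--     if primary in ("PG", "SG", "G"):
--         return "G"
--     if primary in ("SF", "PF", "F"):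
--         return "F"
--     if primary == "C":
--         return "C"
--     if "GUARD" in primary:
--         return "G"
--     if "FORWARD" in primary:
--         return "F"
--     if "CENTER" in primary:
--         return "C"
--     return "F"
-- ===== Notes on version B (the rewrite author's own statement) =====
-- stated objective: simpler
-- what changed: Replaces the self-recursive combo handling with a single up-front extraction of the primary token (split on '-', take the first part, strip), followed by one flat check chain; no recursion and no separate dash branch.
import Mathlib
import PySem

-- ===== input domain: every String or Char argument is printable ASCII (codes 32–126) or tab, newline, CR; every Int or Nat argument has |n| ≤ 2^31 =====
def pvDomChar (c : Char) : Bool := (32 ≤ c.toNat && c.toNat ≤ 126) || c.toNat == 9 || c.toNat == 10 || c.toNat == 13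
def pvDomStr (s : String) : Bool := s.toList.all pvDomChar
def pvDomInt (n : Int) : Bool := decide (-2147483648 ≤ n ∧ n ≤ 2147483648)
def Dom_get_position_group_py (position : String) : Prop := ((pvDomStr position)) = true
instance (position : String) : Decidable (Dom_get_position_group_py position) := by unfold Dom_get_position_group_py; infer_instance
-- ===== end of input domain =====

-- B replaces A's self-recursive combo handling by extracting the primary token up front; objective: simpler.

-- ===== PORT A =====
-- Lemmas cited by A's termination proof (decreasing_by) — they must precede the def.

-- splitOn.go with a nonempty accumulator just prepends the finished pieces
theorem pv_go_acc (d : Char) (fuel : Nat) :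
    ∀ (l cur : List Char) (acc : List (List Char)),
      PySem.Chars.splitOn.go [d] fuel l cur acc =
        acc.reverse ++ PySem.Chars.splitOn.go [d] fuel l cur [] := by
  induction fuel with
  | zero => intro l cur acc; simp [PySem.Chars.splitOn.go]
  | succ n ih =>
    intro l cur acc
    cases l with
    | nil => simp [PySem.Chars.splitOn.go]
    | cons c rest =>
      simp only [PySem.Chars.splitOn.go]
      split
      · rw [ih _ _ (cur.reverse :: acc), ih _ _ [cur.reverse]]
        simp
      · exact ih _ _ _

-- the first piece produced by splitOn.go is cur.reverse ++ takeWhile (· ≠ d)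
theorem pv_go_head (d : Char) (fuel : Nat) :
    ∀ (l cur : List Char), l.length ≤ fuel →
      ∃ t, PySem.Chars.splitOn.go [d] fuel l cur [] =
        (cur.reverse ++ l.takeWhile (fun c => c ≠ d)) :: t := by
  induction fuel with
  | zero =>
    intro l cur h
    have : l = [] := List.length_eq_zero_iff.mp (Nat.le_zero.mp h)
    subst this
    exact ⟨[], by simp [PySem.Chars.splitOn.go]⟩
  | succ n ih =>
    intro l cur h
    cases l with
    | nil => exact ⟨[], by simp [PySem.Chars.splitOn.go]⟩
    | cons c rest =>
      simp only [PySem.Chars.splitOn.go]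
      by_cases hd : c = d
      · subst hd
        have hpre : [c].isPrefixOf (c :: rest) = true := by simp [List.isPrefixOf]
        rw [if_pos hpre, pv_go_acc]
        exact ⟨PySem.Chars.splitOn.go [c] n (List.drop 1 (c :: rest)) [] [], by simp⟩
      · have hpre : [d].isPrefixOf (c :: rest) = false := by
          simp [List.isPrefixOf]; exact fun h' => hd h'.symm
        rw [if_neg (by simp [hpre])]
        obtain ⟨t, ht⟩ := ih rest (c :: cur) (by simpa using Nat.le_of_succ_le_succ h)
        refine ⟨t, ?_⟩
        rw [ht]
        simp [hd]

-- first element of s.split("-")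
theorem pv_splitOn_head (d : Char) (l : List Char) :
    ∃ t, PySem.Chars.splitOn l [d] = l.takeWhile (fun c => c ≠ d) :: t := by
  obtain ⟨t, ht⟩ := pv_go_head d (l.length + 1) l [] (by omega)
  exact ⟨t, by simpa [PySem.Chars.splitOn] using ht⟩

-- characters survive strip
theorem pv_mem_strip {l : List Char} {c : Char} (h : c ∈ PySem.Chars.strip l) : c ∈ l := by
  unfold PySem.Chars.strip PySem.Chars.rstrip PySem.Chars.lstrip at h
  rw [List.mem_reverse] at h
  have h1 := List.IsSuffix.mem h (List.dropWhile_suffix _)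
  rw [List.mem_reverse] at h1
  exact List.IsSuffix.mem h1 (List.dropWhile_suffix _)

-- '-' in upper(s) forces '-' in s
theorem pv_mem_upper_dash {l : List Char} (h : '-' ∈ PySem.Chars.upper l) : '-' ∈ l := by
  unfold PySem.Chars.upper at h
  obtain ⟨c, hc, he⟩ := List.mem_map.mp h
  unfold PySem.Chars.upperChar at he
  split at he
  · next hl =>
    exfalso
    unfold PySem.Chars.islower at hl
    simp only [Bool.and_eq_true, decide_eq_true_eq] at hl
    obtain ⟨hl1', hl2'⟩ := hl
    rw [Char.le_def, UInt32.le_iff_toBitVec_le] at hl1' hl2'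
    have hl1 : 97 ≤ c.toNat := hl1'
    have hl2 : c.toNat ≤ 122 := hl2'
    have hv : Nat.isValidChar (c.toNat - 32) := Or.inl (by omega)
    have htn : (Char.ofNat (c.toNat - 32)).toNat = c.toNat - 32 := by
      rw [Char.toNat_ofNat, if_pos hv]
    rw [he] at htn
    rw [show ('-').toNat = 45 from rfl] at htn
    omega
  · exact he ▸ hc

-- the first token of pos.split("-") contains no '-' and fewer dashes than position
theorem pv_arg_count_lt (position : String)
    (hdash : PySem.Str.isIn "-" (PySem.Str.strip (PySem.Str.upper position)) = true) :
    (PySem.List.pyGetD ((PySem.Str.split? (PySem.Str.strip (PySem.Str.upper position)) "-").getD []) 0 "").toList.count '-'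
      < position.toList.count '-' := by
  set pos := PySem.Str.strip (PySem.Str.upper position) with hpos
  have hsplit : PySem.Str.split? pos "-" =
      some ((PySem.Chars.splitOn pos.toList ['-']).map String.ofList) := by
    simp [PySem.Str.split?, PySem.Chars.split?]
  obtain ⟨t, ht⟩ := pv_splitOn_head '-' pos.toList
  have hmem : '-' ∈ position.toList := by
    have h1 : '-' ∈ pos.toList := by
      have := (PySem.Str.isIn_iff_infix "-" pos).mp hdash
      simpa using (List.singleton_infix_iff '-' pos.toList).mp (by simpa using this)
    have h2 : pos.toList = PySem.Chars.strip (PySem.Chars.upper position.toList) := by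
      simp [hpos, PySem.Str.strip, PySem.Str.upper]
    rw [h2] at h1
    exact pv_mem_upper_dash (pv_mem_strip h1)
  have hz : (PySem.List.pyGetD ((PySem.Str.split? pos "-").getD []) 0 "").toList.count '-' = 0 := by
    rw [hsplit]
    simp only [Option.getD_some, ht, List.map_cons, PySem.List.pyGetD_zero, List.getD_cons_zero,
      String.toList_ofList]
    rw [List.count_eq_zero]
    intro hc
    have := List.mem_takeWhile_imp hc
    simp at this
  rw [hz]
  exact List.count_pos_iff.mpr hmem

def get_position_group_py (position : String) : String :=
  let pos := PySem.Str.strip (PySem.Str.upper position)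
  if pos = "" then "F"
  else if pos ∈ ["PG", "SG", "G"] then "G"
  else if pos ∈ ["SF", "PF", "F"] then "F"
  else if pos ∈ ["C"] then "C"
  else if PySem.Str.isIn "-" pos then
    -- parts = pos.split("-"); split? is some because the separator "-" is nonempty,
    -- and parts[0] is in range because split always returns a nonempty list
    let parts := (PySem.Str.split? pos "-").getD []
    get_position_group_py (PySem.List.pyGetD parts 0 "")
  else if PySem.Str.isIn "GUARD" pos then "G"
  else if PySem.Str.isIn "FORWARD" pos then "F"
  else if PySem.Str.isIn "CENTER" pos then "C"
  else "F"
termination_by position.toList.count '-'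
decreasing_by
  exact pv_arg_count_lt position (by assumption)

-- ===== PORT B =====
def get_position_group_py_alt (position : String) : String :=
  let primary := PySem.Str.strip
    (PySem.List.pyGetD ((PySem.Str.split? (PySem.Str.strip (PySem.Str.upper position)) "-").getD []) 0 "")
  if primary = "" then "F"
  else if primary ∈ ["PG", "SG", "G"] then "G"
  else if primary ∈ ["SF", "PF", "F"] then "F"
  else if primary = "C" then "C"
  else if PySem.Str.isIn "GUARD" primary then "G"
  else if PySem.Str.isIn "FORWARD" primary then "F"
  else if PySem.Str.isIn "CENTER" primary then "C"
  else "F"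

-- ===== PRECONDITION & SPEC =====
def Spec_get_position_group_py (position : String) (out : String) : Prop := out = get_position_group_py_alt position
instance (position : String) (out : String) : Decidable (Spec_get_position_group_py position out) := by unfold Spec_get_position_group_py; infer_instance

-- ===== CLAIM (what is proved, stated in full; the proofs are below) =====
def Claim_equal_get_position_group_py : Prop := ∀ (position : String), Dom_get_position_group_py position → Spec_get_position_group_py position (get_position_group_py position)

-- ===== LEMMAS AND PROOFS =====

-- dropWhile over a list ending in a kept element keeps the last element
theorem pv_dropWhile_append_singleton (p : Char → Bool) (y : List Char) (a : Char)
    (h : p a = false) : ∃ s, List.dropWhile p (y ++ [a]) = s ++ [a] := by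
  induction y with
  | nil => exact ⟨[], by simp [h]⟩
  | cons b y' ih =>
    by_cases hb : p b = true
    · obtain ⟨s, hs⟩ := ih
      exact ⟨s, by simp [hb, hs]⟩
    · exact ⟨b :: y', by simp [Bool.eq_false_iff.mpr hb]⟩

theorem pv_lstrip_strip (l : List Char) :
    PySem.Chars.lstrip (PySem.Chars.strip l) = PySem.Chars.strip l := by
  unfold PySem.Chars.strip PySem.Chars.rstrip PySem.Chars.lstrip
  cases h : List.dropWhile PySem.Chars.isspace l with
  | nil => simp
  | cons a t =>
    have hpa : PySem.Chars.isspace a = false := by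
      have := List.head_dropWhile_not (l := l) PySem.Chars.isspace (by simp [h])
      simpa [h] using this
    obtain ⟨s, hs⟩ := pv_dropWhile_append_singleton PySem.Chars.isspace t.reverse a hpa
    rw [List.reverse_cons, hs]
    simp [hpa]

theorem pv_strip_idem (l : List Char) :
    PySem.Chars.strip (PySem.Chars.strip l) = PySem.Chars.strip l := by
  have h1 : PySem.Chars.rstrip (PySem.Chars.strip l) = PySem.Chars.strip l := by
    unfold PySem.Chars.strip PySem.Chars.rstrip
    rw [List.reverse_reverse, List.dropWhile_idempotent]
  calc PySem.Chars.strip (PySem.Chars.strip l)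
      = PySem.Chars.rstrip (PySem.Chars.lstrip (PySem.Chars.strip l)) := rfl
    _ = PySem.Chars.rstrip (PySem.Chars.strip l) := by rw [pv_lstrip_strip]
    _ = PySem.Chars.strip l := h1

-- no separator in the string: split returns the whole string
theorem pv_go_no (d : Char) (fuel : Nat) :
    ∀ (l cur : List Char), l.length ≤ fuel → d ∉ l →
      PySem.Chars.splitOn.go [d] fuel l cur [] = [cur.reverse ++ l] := by
  induction fuel with
  | zero =>
    intro l cur h _
    have : l = [] := List.length_eq_zero_iff.mp (Nat.le_zero.mp h)
    subst this; simp [PySem.Chars.splitOn.go]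
  | succ n ih =>
    intro l cur h hnd
    cases l with
    | nil => simp [PySem.Chars.splitOn.go]
    | cons c rest =>
      have hcd : c ≠ d := fun he => hnd (he ▸ List.mem_cons_self)
      simp only [PySem.Chars.splitOn.go]
      have hpre : [d].isPrefixOf (c :: rest) = false := by
        simp [List.isPrefixOf]; exact fun h' => hcd h'.symm
      rw [if_neg (by simp [hpre])]
      rw [ih rest (c :: cur) (by simpa using Nat.le_of_succ_le_succ h)
        (fun hm => hnd (List.mem_cons_of_mem _ hm))]
      simp

theorem pv_splitOn_no (d : Char) (l : List Char) (h : d ∉ l) :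
    PySem.Chars.splitOn l [d] = [l] := by
  simpa [PySem.Chars.splitOn] using pv_go_no d (l.length + 1) l [] (by omega) h

theorem pv_upperChar_idem (c : Char) :
    PySem.Chars.upperChar (PySem.Chars.upperChar c) = PySem.Chars.upperChar c := by
  by_cases hl : PySem.Chars.islower c = true
  · unfold PySem.Chars.upperChar
    rw [if_pos hl]
    unfold PySem.Chars.islower at hl
    simp only [Bool.and_eq_true, decide_eq_true_eq] at hl
    obtain ⟨hl1', hl2'⟩ := hl
    rw [Char.le_def, UInt32.le_iff_toBitVec_le] at hl1' hl2'
    have hl1 : 97 ≤ c.toNat := hl1'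
    have hl2 : c.toNat ≤ 122 := hl2'
    have hv : Nat.isValidChar (c.toNat - 32) := Or.inl (by omega)
    have htn : (Char.ofNat (c.toNat - 32)).toNat = c.toNat - 32 := by
      rw [Char.toNat_ofNat, if_pos hv]
    rw [if_neg ?_]
    unfold PySem.Chars.islower
    simp only [Bool.and_eq_true, decide_eq_true_eq, not_and]
    intro ha
    rw [Char.le_def, UInt32.le_iff_toBitVec_le] at ha
    have ha' : 97 ≤ (Char.ofNat (c.toNat - 32)).toNat := ha
    intro hz
    rw [Char.le_def, UInt32.le_iff_toBitVec_le] at hz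
    omega
  · unfold PySem.Chars.upperChar
    rw [if_neg hl, if_neg hl]

-- every character of strip(upper(s)) is fixed by upperChar
theorem pv_mem_pos_fixed (position : String) {c : Char}
    (h : c ∈ (PySem.Str.strip (PySem.Str.upper position)).toList) :
    PySem.Chars.upperChar c = c := by
  have h2 : (PySem.Str.strip (PySem.Str.upper position)).toList
      = PySem.Chars.strip (PySem.Chars.upper position.toList) := by
    simp [PySem.Str.strip, PySem.Str.upper]
  rw [h2] at h
  have h3 := pv_mem_strip h
  unfold PySem.Chars.upper at h3
  obtain ⟨a, _, ha⟩ := List.mem_map.mp h3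
  rw [← ha]
  exact pv_upperChar_idem a

theorem pv_isIn_dash (s : String) : PySem.Str.isIn "-" s = true ↔ '-' ∈ s.toList := by
  rw [PySem.Str.isIn_iff_infix]
  simpa using List.singleton_infix_iff '-' s.toList


theorem pv_upper_fixed {l : List Char} (h : ∀ c ∈ l, PySem.Chars.upperChar c = c) :
    PySem.Chars.upper l = l := by
  unfold PySem.Chars.upper
  induction l with
  | nil => rfl
  | cons a t ih => simp [h a (by simp), ih (fun c hc => h c (by simp [hc]))]

theorem pv_chain_eq (q s : String) (hnd : PySem.Str.isIn "-" q = false) :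
    (if q = "" then "F"
     else if q ∈ ["PG", "SG", "G"] then "G"
     else if q ∈ ["SF", "PF", "F"] then "F"
     else if q ∈ ["C"] then "C"
     else if PySem.Str.isIn "-" q then s
     else if PySem.Str.isIn "GUARD" q then "G"
     else if PySem.Str.isIn "FORWARD" q then "F"
     else if PySem.Str.isIn "CENTER" q then "C"
     else "F")
    = (if q = "" then "F"
     else if q ∈ ["PG", "SG", "G"] then "G"
     else if q ∈ ["SF", "PF", "F"] then "F"
     else if q = "C" then "C"
     else if PySem.Str.isIn "GUARD" q then "G"
     else if PySem.Str.isIn "FORWARD" q then "F"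
     else if PySem.Str.isIn "CENTER" q then "C"
     else "F") := by
  simp only [hnd, List.mem_singleton, Bool.false_eq_true, if_false]

theorem pv_main (position : String) :
    get_position_group_py position = get_position_group_py_alt position := by
  rw [get_position_group_py, get_position_group_py_alt]
  simp only []
  set pos := PySem.Str.strip (PySem.Str.upper position) with hpos
  set p0 := PySem.List.pyGetD ((PySem.Str.split? pos "-").getD []) 0 "" with hp0
  have hsplit : PySem.Str.split? pos "-" =
      some ((PySem.Chars.splitOn pos.toList ['-']).map String.ofList) := by
    simp [PySem.Str.split?, PySem.Chars.split?]
  have htl : pos.toList = PySem.Chars.strip (PySem.Chars.upper position.toList) := by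
    simp [hpos, PySem.Str.strip, PySem.Str.upper]
  by_cases hd : '-' ∈ pos.toList
  · -- combo case: pos contains a dash
    obtain ⟨t, ht⟩ := pv_splitOn_head '-' pos.toList
    have hp0v : p0 = String.ofList (pos.toList.takeWhile (fun c => decide (c ≠ '-'))) := by
      rw [hp0, hsplit]
      simp [ht, PySem.List.pyGetD_zero]
    have hne : pos ≠ "" := by
      intro h; rw [h] at hd; simp at hd
    have hnm1 : pos ∉ (["PG", "SG", "G"] : List String) := by
      intro hm; simp only [List.mem_cons] at hm
      rcases hm with h1 | h1 | h1 | hm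
      · rw [h1] at hd; exact absurd hd (by decide)
      · rw [h1] at hd; exact absurd hd (by decide)
      · rw [h1] at hd; exact absurd hd (by decide)
      · simp at hm
    have hnm2 : pos ∉ (["SF", "PF", "F"] : List String) := by
      intro hm; simp only [List.mem_cons] at hm
      rcases hm with h1 | h1 | h1 | hm
      · rw [h1] at hd; exact absurd hd (by decide)
      · rw [h1] at hd; exact absurd hd (by decide)
      · rw [h1] at hd; exact absurd hd (by decide)
      · simp at hm
    have hnm3 : pos ∉ (["C"] : List String) := by
      intro hm; simp only [List.mem_singleton] at hm
      rw [hm] at hd; exact absurd hd (by decide)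
    have hdash : PySem.Str.isIn "-" pos = true := (pv_isIn_dash pos).mpr hd
    rw [if_neg hne, if_neg hnm1, if_neg hnm2, if_neg hnm3, if_pos hdash]
    -- A recurses on the first token p0; unfold that call
    rw [get_position_group_py]
    simp only []
    have hfix : ∀ c ∈ pos.toList.takeWhile (fun c => decide (c ≠ '-')),
        PySem.Chars.upperChar c = c := by
      intro c hc
      exact pv_mem_pos_fixed position ((List.takeWhile_sublist _).subset hc)
    have hup : PySem.Str.upper p0 = p0 := by
      have h1 : (PySem.Str.upper p0).toList = p0.toList := by
        rw [hp0v]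
        simp only [PySem.Str.upper, String.toList_ofList]
        exact pv_upper_fixed hfix
      have := congrArg String.ofList h1
      simpa [String.ofList_toList] using this
    rw [hup]
    have hnd2 : PySem.Str.isIn "-" (PySem.Str.strip p0) = false := by
      rw [Bool.eq_false_iff]
      intro h
      have hm := (pv_isIn_dash _).mp h
      have hm2 : '-' ∈ PySem.Chars.strip p0.toList := by
        simpa [PySem.Str.strip] using hm
      have hm3 := pv_mem_strip hm2
      rw [hp0v, String.toList_ofList] at hm3
      have := List.mem_takeWhile_imp hm3
      simp at this
    exact pv_chain_eq _ _ hnd2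
  · -- no dash: the split returns [pos] and strip is idempotent
    have hsp : PySem.Chars.splitOn pos.toList ['-'] = [pos.toList] :=
      pv_splitOn_no '-' pos.toList hd
    have hp0v : p0 = pos := by
      rw [hp0, hsplit, hsp]
      simp [PySem.List.pyGetD_zero, String.ofList_toList]
    have hprim : PySem.Str.strip p0 = pos := by
      rw [hp0v]
      have h1 : (PySem.Str.strip pos).toList = pos.toList := by
        rw [htl]
        simp only [PySem.Str.strip, String.toList_ofList]
        rw [← htl, htl, pv_strip_idem]
      have := congrArg String.ofList h1
      simpa [String.ofList_toList] using this
    have hndash : PySem.Str.isIn "-" pos = false :=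
      Bool.eq_false_iff.mpr (fun h => hd ((pv_isIn_dash pos).mp h))
    rw [hprim]
    exact pv_chain_eq _ _ hndash

-- ===== VERDICT (by name: the statement is the Claim_ definition above) =====
theorem get_position_group_py_spec : Claim_equal_get_position_group_py := by
  intro position _
  unfold Spec_get_position_group_py
  exact pv_main position
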